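-- pv_equiv track=rewrite | github.com/takuya178/python-algorithm | array.py | hasPenalty
-- ===== SOURCE A (Python) =====
-- def hasPenalty(records: list) -> bool:
--     isPenalty = True
--     while len(records) > 1:
--         if records[0] < records[1] or records[0] == records[1]:
--             isPenalty = False
--         else:
--             isPenalty = True
--             break
--         records = records[1:]
--     return isPenalty
-- ===== SOURCE B (Python) =====
-- def hasPenalty(records: list) -> bool:
--     if len(records) < 2:
--         return True
--     return any(a > b for a, b in zip(records, records[1:]))
-- ===== Notes on version B (the rewrite author's own statement) =====
-- stated objective: faster
-- what changed: Replaced the while-loop that repeatedly reslices the list (records = records[1:], quadratic copying) with a single zip pass over adjacent pairs using any().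
import Mathlib
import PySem

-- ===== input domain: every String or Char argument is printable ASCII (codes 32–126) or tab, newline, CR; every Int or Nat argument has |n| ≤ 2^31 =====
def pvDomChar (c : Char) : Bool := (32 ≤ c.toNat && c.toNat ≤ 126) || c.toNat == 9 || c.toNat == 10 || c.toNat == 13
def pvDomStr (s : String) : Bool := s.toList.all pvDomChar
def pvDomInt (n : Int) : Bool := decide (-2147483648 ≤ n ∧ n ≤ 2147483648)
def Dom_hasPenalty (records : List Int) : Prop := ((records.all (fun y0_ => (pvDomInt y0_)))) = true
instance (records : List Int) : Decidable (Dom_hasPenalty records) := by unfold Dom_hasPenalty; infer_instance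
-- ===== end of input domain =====

-- B replaces A's while-loop over repeatedly resliced lists with one zip pass over adjacent pairs (faster in a timing run's mechanism: no repeated slicing).

-- ===== PORT A =====
-- A's while-loop: state is (isPenalty, records); each iteration with len > 1 either
-- sets isPenalty := False and drops the head (records = records[1:]), or breaks with True.
def hasPenaltyLoop (isPenalty : Bool) : List Int → Bool
  | a :: b :: rest =>
      if a < b ∨ a = b then hasPenaltyLoop false (b :: rest)
      else true
  | _ => isPenalty

def hasPenalty (records : List Int) : Bool := hasPenaltyLoop true records

-- ===== PORT B =====
def hasPenalty_alt (records : List Int) : Bool :=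
  if records.length < 2 then true
  else (records.zip records.tail).any (fun p => p.1 > p.2)

-- ===== PRECONDITION & SPEC =====
def Spec_hasPenalty (records : List Int) (out : Bool) : Prop := out = hasPenalty_alt records
instance (records : List Int) (out : Bool) : Decidable (Spec_hasPenalty records out) := by unfold Spec_hasPenalty; infer_instance

-- ===== CLAIM (what is proved, stated in full; the proofs are below) =====
def Claim_equal_hasPenalty : Prop := ∀ (records : List Int), Dom_hasPenalty records → Spec_hasPenalty records (hasPenalty records)

-- ===== LEMMAS AND PROOFS =====
-- After the first iteration A's flag is false; from then on it computes exactly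
-- "some adjacent pair strictly decreases", i.e. any over the zip with the tail.
theorem hasPenaltyLoop_false (rest : List Int) : ∀ (a : Int),
    hasPenaltyLoop false (a :: rest) = ((a :: rest).zip rest).any (fun p => p.1 > p.2) := by
  induction rest with
  | nil => intro a; simp [hasPenaltyLoop]
  | cons b rs ih =>
      intro a
      by_cases h : a < b ∨ a = b
      · have hnot : ¬ (a > b) := by rcases h with h | h <;> omega
        simp [hasPenaltyLoop, h, ih b, hnot]
      · have hgt : a > b := by omega
        simp [hasPenaltyLoop, h, hgt]

-- ===== VERDICT (by name: the statement is the Claim_ definition above) =====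
theorem hasPenalty_spec : Claim_equal_hasPenalty := by
  intro records _
  unfold Spec_hasPenalty hasPenalty hasPenalty_alt
  match records with
  | [] => simp [hasPenaltyLoop]
  | [a] => simp [hasPenaltyLoop]
  | a :: b :: rest =>
      by_cases h : a < b ∨ a = b
      · have hnot : ¬ (a > b) := by rcases h with h | h <;> omega
        simp [hasPenaltyLoop, h, hnot, hasPenaltyLoop_false rest b]
      · have hgt : a > b := by omega
        simp [hasPenaltyLoop, h, hgt]
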